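-- pv_equiv track=rewrite | github.com/NogNoa/Hello-internet | TableRead.py | exhref
-- ===== SOURCE A (Python) =====
-- def exhref(txt):
--     """takes the url part of a hyperlink"""
--     txt = str(txt)
--     new = ''
--     href = False
--     j = 0
--     for i in txt:
--         if txt[j - 6:j] == 'href="':
--             href = True
--         elif txt[j:j + 2] == '">':
--             href = False
--         if href:
--             new += i
--         j += 1
--     return new
-- ===== SOURCE B (Python) =====
-- def exhref(txt):
--     """takes the url part of a hyperlink"""
--     txt = str(txt)
--     pieces = []
--     i = 0
--     while True:
--         s = txt.find('href="', i)
--         if s == -1: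
--             break
--         start = s + 6
--         e = txt.find('">', start)
--         if e == -1:
--             pieces.append(txt[start:])
--             break
--         pieces.append(txt[start:e])
--         i = e + 2
--     return ''.join(pieces)
-- ===== Notes on version B (the rewrite author's own statement) =====
-- stated objective: faster
-- what changed: A scans every character and toggles a boolean flag by comparing a six- and a two-character window at each position; B is a find-based parser that jumps with str.find from one 'href="' opener to the first following '">' closer and slices the URL out in one piece. Pre_ excludes strings with overlapping delimiters (the substring 'href="">', or an 'href=">' whose quote simultaneously closes an open link), where no behaviour is specified and the two parsers resolve the overlap differently.
-- outside the precondition, e.g. on exhref('href="">'): A returns '">', B returns ''; on exhref('href="ahref=">t'): A returns 'ahref=>t', B returns 'ahref='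
import Mathlib
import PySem

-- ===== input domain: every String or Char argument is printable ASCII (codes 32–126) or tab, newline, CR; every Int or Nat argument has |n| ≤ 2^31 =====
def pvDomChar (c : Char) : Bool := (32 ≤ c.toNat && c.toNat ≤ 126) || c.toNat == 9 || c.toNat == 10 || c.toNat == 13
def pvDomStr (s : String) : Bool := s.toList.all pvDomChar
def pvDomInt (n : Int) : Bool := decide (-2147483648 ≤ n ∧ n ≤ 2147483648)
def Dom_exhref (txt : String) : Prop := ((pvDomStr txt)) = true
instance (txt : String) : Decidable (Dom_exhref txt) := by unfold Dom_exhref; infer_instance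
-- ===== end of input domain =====

-- B replaces A's per-character flag machine with a find-based parser that jumps from each
-- 'href="' opener to the first following '">' closer (measurably faster, constant factor);
-- Pre_exhref excludes strings with overlapping delimiters, where the two parsers disagree.

-- ===== PORT A =====
-- A: scan every character, toggling `href` on 'href="' (window ending at j) and off on '">'
-- (window starting at j, elif), appending the char while the flag is on.
-- the body of A's for-loop: state is (new, href, j)
def pvStepA (cs : List Char) (st : List Char × Bool × Int) (i : Char) : List Char × Bool × Int :=
  match st with
  | (new, href, j) =>
    let href' :=
      if PySem.Chars.slice cs (some (j - 6)) (some j) = "href=\"".toList then true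
      else if PySem.Chars.slice cs (some j) (some (j + 2)) = "\">".toList then false
      else href
    ((if href' then new ++ [i] else new), href', j + 1)

def exhref (txt : String) : String :=
  String.ofList ((txt.toList.foldl (pvStepA txt.toList) ([], false, 0)).1)

-- ===== PORT B =====
-- B's while-loop, as fuel recursion (each iteration moves the search index i strictly right,
-- so cs.length + 1 fuel is always enough): find the next 'href="' from i, cut the piece up to
-- the first '">' after the opener (or to the end of the string), continue after the closer.
def pvExtract (cs : List Char) : Nat → Nat → List Char
  | 0, _ => []
  | d + 1, i =>
    let s := PySem.Chars.findFrom cs "href=\"".toList (i : Int) none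
    if s = -1 then []
    else
      let start : Nat := s.toNat + 6
      let e := PySem.Chars.findFrom cs "\">".toList (start : Int) none
      if e = -1 then PySem.Chars.slice cs (some (start : Int)) none
      else PySem.Chars.slice cs (some (start : Int)) (some e) ++ pvExtract cs d (e.toNat + 2)

def exhref_alt (txt : String) : String :=
  String.ofList (pvExtract txt.toList (txt.toList.length + 1) 0)

-- ===== PRECONDITION & SPEC =====
-- substring test: does pattern p occur in txt at position j?
def pv_find (txt p : String) (j : Nat) : Bool := p.toList.isPrefixOf (txt.toList.drop j)

-- Pre_ excludes strings in which an 'href="' opener overlaps a '">' terminator — the substring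
-- 'href="">', or an 'href=">' whose quote simultaneously closes an open link (an earlier opener
-- with no '">' in between): on such overlapping delimiters no behaviour is specified, and A's
-- window machine and B's find-based parser resolve the overlap differently.
def Pre_exhref (txt : String) : Prop :=
  ¬ (PySem.Str.isIn "href=\"" txt ∧
      ∃ a < txt.length, pv_find txt "href=\"\">" a ∨ pv_find txt "href=\">" a ∧
        ∃ b < a, pv_find txt "href=\"" b ∧ ∀ k < a + 5, b + 6 < k → ¬ pv_find txt "\">" k)
instance (txt : String) : Decidable (Pre_exhref txt) := by unfold Pre_exhref; infer_instance

def pvWitness_exhref : String := "see <a href=\"x.com\">x</a>"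

def Spec_exhref (txt : String) (out : String) : Prop := out = exhref_alt txt
instance (txt : String) (out : String) : Decidable (Spec_exhref txt out) := by unfold Spec_exhref; infer_instance

-- ===== CLAIM (what is proved, stated in full; the proofs are below) =====
def Claim_equal_exhref : Prop := ∀ (txt : String), Dom_exhref txt → Pre_exhref txt → Spec_exhref txt (exhref txt)

-- ===== LEMMAS AND PROOFS =====

-- an "on event" at scan position j: A's window txt[j-6:j] equals 'href="'
def OnEv (cs : List Char) (j : Nat) : Prop := 6 ≤ j ∧ "href=\"".toList <+: cs.drop (j - 6)

-- an "off event" at scan position j: txt[j:j+2]='">' and no on event there (A's elif)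
def OffEv (cs : List Char) (j : Nat) : Prop := ("\">".toList <+: cs.drop j) ∧ ¬ OnEv cs j

theorem OnEv_le (cs : List Char) (j : Nat) (h : OnEv cs j) : j ≤ cs.length := by
  obtain ⟨h6, hp⟩ := h
  have hl := hp.length_le
  rw [show ("href=\"".toList).length = 6 from rfl, List.length_drop] at hl
  omega

theorem OffEv_lt (cs : List Char) (e : Nat) (h : OffEv cs e) : e + 2 ≤ cs.length := by
  obtain ⟨hp, -⟩ := h
  have hl := hp.length_le
  rw [show ("\">".toList).length = 2 from rfl, List.length_drop] at hl
  omega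

-- A's opening test, characterised: slice cs [j-6:j] = 'href="' iff OnEv cs j
theorem cond6_iff (cs : List Char) (j : Nat) :
    (PySem.Chars.slice cs (some ((j : Int) - 6)) (some (j : Int)) = "href=\"".toList) ↔ OnEv cs j := by
  rw [PySem.Chars.slice_eq_listSlice]
  by_cases h6 : 6 ≤ j
  · rw [show ((j : Int) - 6) = ((j - 6 : Nat) : Int) from by omega, PySem.List.slice_natCast,
      show j - (j - 6) = 6 from by omega]
    constructor
    · intro h
      exact ⟨h6, List.prefix_iff_eq_take.mpr (by rw [show ("href=\"".toList).length = 6 from rfl, h])⟩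
    · rintro ⟨-, hp⟩
      have h := List.prefix_iff_eq_take.mp hp
      rw [show ("href=\"".toList).length = 6 from rfl] at h
      exact h.symm
  · have hlen : (PySem.List.slice cs (some ((j : Int) - 6)) (some (j : Int))).length < 6 := by
      rw [PySem.List.length_slice]
      have h1 := PySem.List.clampIdx_natCast cs.length j
      omega
    constructor
    · intro h
      rw [h, show ("href=\"".toList).length = 6 from rfl] at hlen
      omega
    · rintro ⟨h, -⟩; omega

-- A's closing test, characterised: slice cs [j:j+2] = '">' iff that pattern starts at j
theorem cond2_iff (cs : List Char) (j : Nat) :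
    (PySem.Chars.slice cs (some (j : Int)) (some ((j : Int) + 2)) = "\">".toList) ↔
      "\">".toList <+: cs.drop j := by
  rw [PySem.Chars.slice_eq_listSlice,
    show ((j : Int) + 2) = ((j + 2 : Nat) : Int) from by push_cast; ring,
    PySem.List.slice_natCast, show j + 2 - j = 2 from by omega]
  constructor
  · intro h
    exact List.prefix_iff_eq_take.mpr (by rw [show ("\">".toList).length = 2 from rfl, h])
  · intro hp
    have h := List.prefix_iff_eq_take.mp hp
    rw [show ("\">".toList).length = 2 from rfl] at h
    exact h.symm

-- A's loop re-indexed by scan position (j) instead of folding over the characters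
def runA (cs : List Char) (j : Nat) (href : Bool) : List Char :=
  if h : j < cs.length then
    let href' :=
      if PySem.Chars.slice cs (some ((j : Int) - 6)) (some (j : Int)) = "href=\"".toList then true
      else if PySem.Chars.slice cs (some (j : Int)) (some ((j : Int) + 2)) = "\">".toList then false
      else href
    (if href' then [cs[j]] else []) ++ runA cs (j + 1) href'
  else []
termination_by cs.length - j

theorem runA_ge (cs : List Char) (j : Nat) (b : Bool) (h : cs.length ≤ j) : runA cs j b = [] := by
  rw [runA]
  simp [show ¬ j < cs.length from by omega]

-- the fold in port A computes runA
theorem foldA (cs : List Char) : ∀ (d k : Nat) (new : List Char) (href : Bool),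
    cs.length ≤ k + d →
    (List.foldl (pvStepA cs) (new, href, (k : Int)) (cs.drop k)).1 = new ++ runA cs k href := by
  intro d
  induction d with
  | zero =>
    intro k new href hk
    rw [List.drop_eq_nil_of_le (by omega), runA_ge cs k href (by omega)]
    simp
  | succ d ih =>
    intro k new href hk
    by_cases h : k < cs.length
    · rw [List.drop_eq_getElem_cons h, List.foldl_cons]
      have hstep : pvStepA cs (new, href, (k : Int)) cs[k] =
          ((if (if PySem.Chars.slice cs (some ((k : Int) - 6)) (some (k : Int)) = "href=\"".toList then true
               else if PySem.Chars.slice cs (some (k : Int)) (some ((k : Int) + 2)) = "\">".toList then false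
               else href) then new ++ [cs[k]] else new),
           (if PySem.Chars.slice cs (some ((k : Int) - 6)) (some (k : Int)) = "href=\"".toList then true
            else if PySem.Chars.slice cs (some (k : Int)) (some ((k : Int) + 2)) = "\">".toList then false
            else href), ((k + 1 : Nat) : Int)) := by
        simp [pvStepA]
      rw [hstep, ih (k + 1) _ _ (by omega)]
      conv_rhs => rw [runA]
      simp only [dif_pos h]
      generalize (if PySem.Chars.slice cs (some ((k : Int) - 6)) (some (k : Int)) = "href=\"".toList then true
        else if PySem.Chars.slice cs (some (k : Int)) (some ((k : Int) + 2)) = "\">".toList then false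
        else href) = b'
      cases b' <;> simp
    · rw [List.drop_eq_nil_of_le (by omega), runA_ge cs k href (by omega)]
      simp

-- while the flag is off and no on event occurs, A appends nothing
theorem runA_skip (cs : List Char) : ∀ (d p : Nat),
    (∀ j, p ≤ j → j < p + d → ¬ OnEv cs j) →
    runA cs p false = runA cs (p + d) false := by
  intro d
  induction d with
  | zero => simp
  | succ d ih =>
    intro p hno
    have h1 : runA cs p false = runA cs (p + 1) false := by
      by_cases hp : p < cs.length
      · rw [runA]
        simp only [dif_pos hp]
        have hc6 : ¬ PySem.Chars.slice cs (some ((p : Int) - 6)) (some (p : Int)) = "href=\"".toList :=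
          fun h => hno p le_rfl (by omega) ((cond6_iff cs p).mp h)
        by_cases h2 : PySem.Chars.slice cs (some (p : Int)) (some ((p : Int) + 2)) = "\">".toList <;>
          simp_all
      · rw [runA_ge cs p false (by omega), runA_ge cs (p + 1) false (by omega)]
    rw [h1, ih (p + 1) (fun j hj1 hj2 => hno j (by omega) (by omega)),
      show p + 1 + d = p + (d + 1) from by omega]

theorem runA_skip' (cs : List Char) (p q : Nat) (hpq : p ≤ q)
    (hno : ∀ j, p ≤ j → j < q → ¬ OnEv cs j) :
    runA cs p false = runA cs q false := by
  have := runA_skip cs (q - p) p (fun j hj1 hj2 => hno j hj1 (by omega))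
  rwa [show p + (q - p) = q from by omega] at this

-- if the flag is off and no on event ever occurs again, A appends nothing more
theorem runA_none (cs : List Char) (p : Nat) (hno : ∀ j, p ≤ j → ¬ OnEv cs j) :
    runA cs p false = [] := by
  rw [runA_skip' cs p (max p cs.length) (le_max_left _ _) (fun j hj1 _ => hno j hj1)]
  exact runA_ge cs _ false (le_max_right _ _)

-- while the flag is on and no off event occurs, A copies the rest of the string
theorem runA_in_none (cs : List Char) : ∀ (d j : Nat), cs.length ≤ j + d →
    (∀ q, j ≤ q → ¬ OffEv cs q) →
    runA cs j true = cs.drop j := by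
  intro d
  induction d with
  | zero =>
    intro j hj _
    rw [runA_ge cs j true (by omega), List.drop_eq_nil_of_le (by omega)]
  | succ d ih =>
    intro j hj hno
    by_cases h : j < cs.length
    · rw [runA]
      simp only [dif_pos h]
      have hT : (if PySem.Chars.slice cs (some ((j : Int) - 6)) (some (j : Int)) = "href=\"".toList then true
          else if PySem.Chars.slice cs (some (j : Int)) (some ((j : Int) + 2)) = "\">".toList then false
          else true) = true := by
        by_cases h6 : PySem.Chars.slice cs (some ((j : Int) - 6)) (some (j : Int)) = "href=\"".toList
        · simp_all
        · by_cases h2 : PySem.Chars.slice cs (some (j : Int)) (some ((j : Int) + 2)) = "\">".toList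
          · exact absurd ⟨(cond2_iff cs j).mp h2, fun hOn => h6 ((cond6_iff cs j).mpr hOn)⟩
              (hno j le_rfl)
          · simp_all
      simp only [hT]
      rw [ih (j + 1) (by omega) (fun q hq => hno q (by omega))]
      simp [← List.drop_eq_getElem_cons h]
    · rw [runA_ge cs j true (by omega), List.drop_eq_nil_of_le (by omega)]

-- while the flag is on, A copies up to (excluding) the first off event, then turns off
theorem runA_in_some (cs : List Char) (e : Nat) (he : OffEv cs e) : ∀ (d j : Nat), e - j ≤ d →
    j ≤ e → (∀ q, j ≤ q → q < e → ¬ OffEv cs q) →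
    runA cs j true = (cs.drop j).take (e - j) ++ runA cs (e + 1) false := by
  have hel : e + 2 ≤ cs.length := OffEv_lt cs e he
  intro d
  induction d with
  | zero =>
    intro j hd hj _
    have hje : j = e := by omega
    subst hje
    rw [runA]
    simp only [dif_pos (show j < cs.length from by omega)]
    have hc6 : ¬ PySem.Chars.slice cs (some ((j : Int) - 6)) (some (j : Int)) = "href=\"".toList :=
      fun h => he.2 ((cond6_iff cs j).mp h)
    have hc2 : PySem.Chars.slice cs (some (j : Int)) (some ((j : Int) + 2)) = "\">".toList :=
      (cond2_iff cs j).mpr he.1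
    simp_all
  | succ d ih =>
    intro j hd hj hno
    by_cases hje : j = e
    · subst hje
      rw [runA]
      simp only [dif_pos (show j < cs.length from by omega)]
      have hc6 : ¬ PySem.Chars.slice cs (some ((j : Int) - 6)) (some (j : Int)) = "href=\"".toList :=
        fun h => he.2 ((cond6_iff cs j).mp h)
      have hc2 : PySem.Chars.slice cs (some (j : Int)) (some ((j : Int) + 2)) = "\">".toList :=
        (cond2_iff cs j).mpr he.1
      simp_all
    · have hjlt : j < e := by omega
      rw [runA]
      simp only [dif_pos (show j < cs.length from by omega)]
      have hT : (if PySem.Chars.slice cs (some ((j : Int) - 6)) (some (j : Int)) = "href=\"".toList then true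
          else if PySem.Chars.slice cs (some (j : Int)) (some ((j : Int) + 2)) = "\">".toList then false
          else true) = true := by
        by_cases h6 : PySem.Chars.slice cs (some ((j : Int) - 6)) (some (j : Int)) = "href=\"".toList
        · simp_all
        · by_cases h2 : PySem.Chars.slice cs (some (j : Int)) (some ((j : Int) + 2)) = "\">".toList
          · exact absurd ⟨(cond2_iff cs j).mp h2, fun hOn => h6 ((cond6_iff cs j).mpr hOn)⟩
              (hno j le_rfl hjlt)
          · simp_all
      simp only [hT]
      rw [ih (j + 1) (by omega) (by omega) (fun q hq1 hq2 => hno q (by omega) hq2)]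
      rw [List.drop_eq_getElem_cons (show j < cs.length from by omega),
        show e - j = (e - (j + 1)) + 1 from by omega, List.take_succ_cons]
      simp

-- an on event at start: A copies from start up to the first subsequent off event
theorem runA_on_none (cs : List Char) (start : Nat) (hOn : OnEv cs start)
    (hno : ∀ q, start < q → ¬ OffEv cs q) :
    runA cs start false = cs.drop start := by
  by_cases h : start < cs.length
  · rw [runA]
    simp only [dif_pos h]
    have hc6 : PySem.Chars.slice cs (some ((start : Int) - 6)) (some (start : Int)) = "href=\"".toList :=
      (cond6_iff cs start).mpr hOn
    simp only [hc6, if_pos]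
    rw [runA_in_none cs cs.length (start + 1) (by omega) (fun q hq => hno q (by omega))]
    simp [← List.drop_eq_getElem_cons h]
  · rw [runA_ge cs start false (by omega), List.drop_eq_nil_of_le (by omega)]

theorem runA_on_some (cs : List Char) (start e : Nat) (hOn : OnEv cs start) (he : OffEv cs e)
    (hlt : start < e) (hmin : ∀ q, start < q → q < e → ¬ OffEv cs q) :
    runA cs start false = (cs.drop start).take (e - start) ++ runA cs (e + 1) false := by
  have hel : e + 2 ≤ cs.length := OffEv_lt cs e he
  rw [runA]
  simp only [dif_pos (show start < cs.length from by omega)]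
  have hc6 : PySem.Chars.slice cs (some ((start : Int) - 6)) (some (start : Int)) = "href=\"".toList :=
    (cond6_iff cs start).mpr hOn
  simp only [hc6, if_pos]
  rw [runA_in_some cs e he (e - (start + 1)) (start + 1) le_rfl (by omega)
    (fun q hq1 hq2 => hmin q (by omega) hq2)]
  rw [List.drop_eq_getElem_cons (show start < cs.length from by omega),
    show e - start = (e - (start + 1)) + 1 from by omega, List.take_succ_cons]
  simp

-- findFrom ≠ -1: position, minimality, and the occurrence itself
theorem pvFindFacts (cs sub : List Char) (k : Nat) (hsub : sub ≠ [])
    (h : PySem.Chars.findFrom cs sub (k : Int) none ≠ -1) :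
    0 ≤ PySem.Chars.findFrom cs sub (k : Int) none ∧
    k ≤ (PySem.Chars.findFrom cs sub (k : Int) none).toNat ∧
    (PySem.Chars.findFrom cs sub (k : Int) none).toNat + sub.length ≤ cs.length ∧
    sub <+: cs.drop (PySem.Chars.findFrom cs sub (k : Int) none).toNat ∧
    ∀ q, k ≤ q → q < (PySem.Chars.findFrom cs sub (k : Int) none).toNat → ¬ sub <+: cs.drop q := by
  by_cases hk : k ≤ cs.length
  · obtain ⟨h1, h2, h3⟩ := PySem.Chars.findFrom_natCast_spec cs sub k hk h
    have hpl := h2.length_le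
    simp only [List.length_drop] at hpl
    have hne : sub.length ≠ 0 := by simpa using hsub
    have hle : (PySem.Chars.findFrom cs sub (k : Int) none).toNat ≤ cs.length := by
      by_contra hgt
      rw [List.drop_eq_nil_of_le (by omega)] at h2
      exact hsub (List.prefix_nil.mp h2)
    exact ⟨by omega, by omega, by omega, h2, h3⟩
  · exfalso
    apply h
    simp [PySem.Chars.findFrom]
    split_ifs with h1 h2 <;> try rfl
    all_goals omega

-- findFrom = -1 means: no occurrence of sub at any position ≥ k
theorem pvFindNone (cs sub : List Char) (k : Nat) (hsub : sub ≠ [])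
    (h : PySem.Chars.findFrom cs sub (k : Int) none = -1) :
    ∀ q, k ≤ q → ¬ sub <+: cs.drop q := by
  intro q hq hp
  by_cases hk : k ≤ cs.length
  · rw [PySem.Chars.findFrom_natCast_eq_neg_one_iff cs sub k hk] at h
    apply h
    have : cs.drop q = (cs.drop k).drop (q - k) := by
      rw [List.drop_drop]
      congr 1
      omega
    rw [this] at hp
    exact hp.isInfix.trans (List.drop_suffix _ _).isInfix
  · rw [List.drop_eq_nil_of_le (by omega)] at hp
    exact hsub (List.prefix_nil.mp hp)

-- a prefix occurrence read elementwise
theorem prefix_getElem (cs a : List Char) (t k : Nat) (h : a <+: cs.drop t) (hk : k < a.length)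
    (hlen : t + k < cs.length) : cs[t + k] = a[k] := by
  have h1 : (cs.drop t)[k]'(by rw [List.length_drop]; have := h.length_le; omega) = a[k] :=
    (h.getElem hk).symm
  rwa [List.getElem_drop] at h1

-- concatenating adjacent occurrences
theorem prefix_append_drop (cs a b : List Char) (t : Nat) (h1 : a <+: cs.drop t)
    (h2 : b <+: cs.drop (t + a.length)) : a ++ b <+: cs.drop t := by
  obtain ⟨r, hr⟩ := h1
  have hdd : cs.drop (t + a.length) = r := by
    rw [← List.drop_drop, ← hr, List.drop_left]
  rw [hdd] at h2
  obtain ⟨r2, hr2⟩ := h2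
  exact ⟨r2, by rw [← hr, ← hr2, List.append_assoc]⟩

-- an infix occurrence has a position
theorem infix_pos (cs x : List Char) (hx : x ≠ []) (h : x <:+: cs) :
    ∃ a, a < cs.length ∧ x <+: cs.drop a := by
  obtain ⟨s, t, hst⟩ := h
  refine ⟨s.length, ?_, ⟨t, ?_⟩⟩
  · have : cs.length = s.length + (x.length + t.length) := by
      rw [← hst]; simp [List.length_append]
    have hxl : x.length ≠ 0 := by simpa using hx
    omega
  · rw [← hst, List.append_assoc, List.drop_left]

-- no 'href="' occurrence can start within 4 before or 1 after a '">' occurrence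
theorem pvClash (cs : List Char) (t e : Nat) (h1 : "href=\"".toList <+: cs.drop t)
    (h2 : "\">".toList <+: cs.drop e) (hlo : e ≤ t + 4) (hhi : t ≤ e + 1) : False := by
  have hl1 := h1.length_le
  have hl2 := h2.length_le
  rw [show ("href=\"".toList).length = 6 from rfl, List.length_drop] at hl1
  rw [show ("\">".toList).length = 2 from rfl, List.length_drop] at hl2
  by_cases hte : t ≤ e
  · have hq : cs[e + 0]'(by omega) = '"' := prefix_getElem cs _ e 0 h2 (by decide) (by omega)
    have hc : cs[t + (e - t)]'(by omega) = ("href=\"".toList)[e - t]'(by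
        rw [show ("href=\"".toList).length = 6 from rfl]; omega) :=
      prefix_getElem cs _ t (e - t) h1
        (by rw [show ("href=\"".toList).length = 6 from rfl]; omega) (by omega)
    simp only [show t + (e - t) = e + 0 from by omega] at hc
    have hcc := hc.symm.trans hq
    rcases (show e - t = 0 ∨ e - t = 1 ∨ e - t = 2 ∨ e - t = 3 ∨ e - t = 4 from by omega)
      with h | h | h | h | h <;> simp only [h] at hcc <;> simp at hcc
  · have hg : cs[e + 1]'(by omega) = '>' := prefix_getElem cs _ e 1 h2 (by decide) (by omega)
    have hc : cs[t + 0]'(by omega) = ("href=\"".toList)[0]'(by decide) :=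
      prefix_getElem cs _ t 0 h1 (by decide) (by omega)
    simp only [show t + 0 = e + 1 from by omega] at hc
    have hcc := hc.symm.trans hg
    simp at hcc

-- when no 'href="">' occurs, every '">' occurrence is an off event
theorem no_on_close (cs : List Char) (h : ¬ "href=\"\">".toList <:+: cs) :
    ∀ q, OnEv cs q → ¬ ("\">".toList <+: cs.drop q) := by
  intro q hOn hp
  apply h
  have h6 := hOn.1
  have h8 : "href=\"\">".toList <+: cs.drop (q - 6) := by
    have h2 : "\">".toList <+: cs.drop (q - 6 + ("href=\"".toList).length) := by
      rw [show ("href=\"".toList).length = 6 from rfl, show q - 6 + 6 = q from by omega]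
      exact hp
    exact prefix_append_drop cs "href=\"".toList "\">".toList (q - 6) hOn.2 h2
  exact h8.isInfix.trans (List.drop_suffix _ _).isInfix

theorem offEv_of_close (cs : List Char) (h : ¬ "href=\"\">".toList <:+: cs) (q : Nat)
    (hp : "\">".toList <+: cs.drop q) : OffEv cs q :=
  ⟨hp, fun hOn => no_on_close cs h q hOn hp⟩

-- MAIN SIMULATION: A's scan from position p (flag off) equals B's extraction from search index i
-- with fuel d, provided every on event before window-end i+6 and at/after p is already excluded
theorem pvMain (cs : List Char) (hd1 : ¬ "href=\"\">".toList <:+: cs)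
    (hd2 : ¬ ∃ a, a < cs.length ∧ "href=\">".toList <+: cs.drop a ∧
      ∃ b, b < a ∧ "href=\"".toList <+: cs.drop b ∧
        ∀ k, k < a + 5 → b + 6 < k → ¬ "\">".toList <+: cs.drop k) :
    ∀ (d i p : Nat), cs.length + 1 ≤ i + d → p ≤ i + 6 →
    (∀ j, p ≤ j → j < i + 6 → ¬ OnEv cs j) →
    runA cs p false = pvExtract cs d i := by
  intro d
  induction d with
  | zero =>
    intro i p hd hp hno
    rw [pvExtract]
    exact runA_none cs p (fun j hj hOn => hno j hj (by have := OnEv_le cs j hOn; omega) hOn)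
  | succ d ih =>
    intro i p hd hp hno
    rw [pvExtract]
    by_cases hs : PySem.Chars.findFrom cs "href=\"".toList (i : Int) none = -1
    · simp only [hs, reduceIte]
      apply runA_none cs p
      intro j hj hOn
      by_cases hj6 : j < i + 6
      · exact hno j hj hj6 hOn
      · exact pvFindNone cs "href=\"".toList i (by decide) hs (j - 6) (by omega) hOn.2
    · obtain ⟨hnn, h1, h2, h3, h4⟩ := pvFindFacts cs "href=\"".toList i (by decide) hs
      simp only [hs, reduceIte]
      set sN := (PySem.Chars.findFrom cs "href=\"".toList (i : Int) none).toNat with hsN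
      have hOn : OnEv cs (sN + 6) := ⟨by omega, by rw [show sN + 6 - 6 = sN from by omega]; exact h3⟩
      have hskip : runA cs p false = runA cs (sN + 6) false := by
        apply runA_skip' cs p (sN + 6) (by omega)
        intro j hj1 hj2 hOn'
        by_cases hj6 : j < i + 6
        · exact hno j hj1 hj6 hOn'
        · exact h4 (j - 6) (by omega) (by omega) hOn'.2
      by_cases he : PySem.Chars.findFrom cs "\">".toList ((sN + 6 : Nat) : Int) none = -1
      · simp only [he, reduceIte]
        rw [hskip, runA_on_none cs (sN + 6) hOn
          (fun q hq hOff => pvFindNone cs "\">".toList (sN + 6) (by decide) he q (by omega) hOff.1)]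
        rw [PySem.Chars.slice_eq_listSlice, PySem.List.slice_from_natCast]
      · obtain ⟨gnn, g1, g2, g3, g4⟩ := pvFindFacts cs "\">".toList (sN + 6) (by decide) he
        simp only [he, reduceIte]
        set eN := (PySem.Chars.findFrom cs "\">".toList ((sN + 6 : Nat) : Int) none).toNat with heN
        have hOff : OffEv cs eN := offEv_of_close cs hd1 eN g3
        have hlt : sN + 6 < eN := by
          rcases Nat.lt_or_ge (sN + 6) eN with h | h
          · exact h
          · exfalso
            have heq : eN = sN + 6 := by omega
            exact hOff.2 (heq ▸ hOn)
        have hmin : ∀ q, sN + 6 < q → q < eN → ¬ OffEv cs q :=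
          fun q hq1 hq2 hOffq => g4 q (by omega) hq2 hOffq.1
        -- no on event can fire in the window [eN+1, eN+8) A rescans after the closer
        have hno' : ∀ j, eN + 1 ≤ j → j < eN + 8 → ¬ OnEv cs j := by
          intro j hj1 hj2 hOnj
          obtain ⟨hj6, hpj⟩ := hOnj
          set t := j - 6 with htdef
          have ht : eN ≤ t + 5 ∧ t ≤ eN + 1 := by omega
          by_cases hte5 : t = eN - 5
          · -- the opener starts 5 before the closer: the d2B pattern 'href=">' occurs at eN-5,
            -- and the last delimiter event before eN is an on event — contradiction with ¬d2B
            have h5e : 5 ≤ eN := by omega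
            have hpat : "href=\">".toList <+: cs.drop (eN - 5) := by
              have hgt : ['>'] <+: cs.drop (eN - 5 + 6) := by
                obtain ⟨r, hr⟩ := g3
                refine ⟨r, ?_⟩
                rw [show eN - 5 + 6 = eN + 1 from by omega, ← List.drop_drop, ← hr]
                rfl
              have := prefix_append_drop cs "href=\"".toList ['>'] (eN - 5)
                (by rwa [hte5] at hpj) (by rwa [show ("href=\"".toList).length = 6 from rfl])
              exact this
            exact absurd ⟨eN - 5, by omega, hpat, sN, by omega, h3,
              fun k hk hbk => g4 k (by omega) (by omega)⟩ hd2
          · exact pvClash cs t eN hpj g3 (by omega) (by omega)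
        have hpiece : PySem.Chars.slice cs (some ((sN + 6 : Nat) : Int))
            (some (PySem.Chars.findFrom cs "\">".toList ((sN + 6 : Nat) : Int) none)) =
            (cs.drop (sN + 6)).take (eN - (sN + 6)) := by
          rw [PySem.Chars.slice_eq_listSlice,
            show PySem.Chars.findFrom cs "\">".toList ((sN + 6 : Nat) : Int) none = ((eN : Nat) : Int)
              from by omega,
            PySem.List.slice_natCast]
        rw [hskip, runA_on_some cs (sN + 6) eN hOn hOff hlt hmin, hpiece,
          ih (eN + 2) (eN + 1) (by omega) (by omega) (fun j hj1 hj2 => hno' j hj1 (by omega))]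

-- ===== VERDICT (by name: the statements are the Claim_ definitions above) =====
theorem exhref_spec : Claim_equal_exhref := by
  intro txt _ hPre
  unfold Spec_exhref
  unfold Pre_exhref at hPre
  unfold exhref exhref_alt
  congr 1
  have hfold := foldA txt.toList txt.toList.length 0 [] false (by omega)
  rw [List.drop_zero] at hfold
  rw [show ((0 : Nat) : Int) = (0 : Int) from rfl] at hfold
  rw [hfold]
  simp only [List.nil_append]
  have hd1 : ¬ "href=\"\">".toList <:+: txt.toList := by
    intro hinf
    obtain ⟨a, ha, hpa⟩ := infix_pos txt.toList _ (by decide) hinf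
    refine hPre ⟨?_, a, ha, Or.inl (by simpa [pv_find] using hpa)⟩
    rw [PySem.Str.isIn_iff_infix]
    exact ((show "href=\"".toList <+: "href=\"\">".toList from by decide).trans hpa).isInfix.trans
      (List.drop_suffix _ _).isInfix
  have hd2 : ¬ ∃ a, a < txt.toList.length ∧ "href=\">".toList <+: txt.toList.drop a ∧
      ∃ b, b < a ∧ "href=\"".toList <+: txt.toList.drop b ∧
        ∀ k, k < a + 5 → b + 6 < k → ¬ "\">".toList <+: txt.toList.drop k := by
    rintro ⟨a, ha, hpa, b, hb, hpb, hk⟩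
    refine hPre ⟨?_, a, ha, Or.inr ⟨by simpa [pv_find] using hpa, b, hb, by simpa [pv_find] using hpb,
      fun k hk1 hk2 => by simpa [pv_find] using hk k hk1 hk2⟩⟩
    rw [PySem.Str.isIn_iff_infix]
    exact hpb.isInfix.trans (List.drop_suffix _ _).isInfix
  exact pvMain txt.toList hd1 hd2 (txt.toList.length + 1) 0 0 (by omega) (by omega)
    (fun j hj1 hj2 hOn => by have := hOn.1; omega)
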